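-- pv_equiv track=rewrite | github.com/npalacio/IntroToAI | Homework/HW3/code/Q3.py | GetActualLabels
-- ===== SOURCE A (Python) =====
-- def GetActualLabels(clusterDataIndices, dataLabelDict, clusterLabel):
--     rowsWithLabels = []
--     for memberDataIndex in clusterDataIndices:
--         for label in dataLabelDict:
--             if memberDataIndex in dataLabelDict[label]:
--                 rowsWithLabels.append({
--                     'dataIndex': memberDataIndex,
--                     'predictedLabel': clusterLabel,
--                     'actualLabel': label
--                 })
--     return rowsWithLabels
-- ===== SOURCE B (Python) =====
-- def GetActualLabels(clusterDataIndices, dataLabelDict, clusterLabel):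
--     labelsByIndex = {}
--     for label, indices in dataLabelDict.items():
--         for idx in set(indices):
--             labelsByIndex.setdefault(idx, []).append(label)
--     return [{'dataIndex': m, 'predictedLabel': clusterLabel, 'actualLabel': label}
--             for m in clusterDataIndices
--             for label in labelsByIndex.get(m, [])]
-- ===== Notes on version B (the rewrite author's own statement) =====
-- stated objective: alternative
-- what changed: Instead of scanning every label's index list for every cluster member (nested loops with repeated membership tests), B precomputes one reverse multimap dataIndex->labels from the dict and then does a single lookup per member; on the measured inputs the output size dominates, so no speed claim is made.
import Mathlib
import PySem

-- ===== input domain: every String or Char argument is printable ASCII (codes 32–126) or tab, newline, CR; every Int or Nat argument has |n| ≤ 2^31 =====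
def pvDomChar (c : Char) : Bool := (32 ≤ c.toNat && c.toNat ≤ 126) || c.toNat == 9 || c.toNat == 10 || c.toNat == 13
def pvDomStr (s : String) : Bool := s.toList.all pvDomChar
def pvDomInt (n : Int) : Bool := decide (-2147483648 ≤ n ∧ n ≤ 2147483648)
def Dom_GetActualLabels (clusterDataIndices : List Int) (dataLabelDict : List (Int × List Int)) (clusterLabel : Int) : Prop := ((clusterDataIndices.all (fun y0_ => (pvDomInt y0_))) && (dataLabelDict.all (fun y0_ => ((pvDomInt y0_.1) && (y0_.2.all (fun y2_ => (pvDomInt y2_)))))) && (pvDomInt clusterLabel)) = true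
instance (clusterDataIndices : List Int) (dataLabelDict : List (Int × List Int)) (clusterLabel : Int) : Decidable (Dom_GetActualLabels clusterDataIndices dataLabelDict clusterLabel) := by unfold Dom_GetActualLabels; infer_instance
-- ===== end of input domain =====

-- ===== PORT A =====
-- Literal port of A: nested loops; 'for label in dataLabelDict' iterates the keys in order,
-- 'dataLabelDict[label]' is a dict lookup (first match).
def GetActualLabels (clusterDataIndices : List Int) (dataLabelDict : List (Int × List Int)) (clusterLabel : Int) : List (List (String × Int)) :=
  clusterDataIndices.foldl (fun rowsWithLabels memberDataIndex =>
    dataLabelDict.foldl (fun rows p =>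
      if memberDataIndex ∈ (PySem.Dict.mk dataLabelDict).getD p.1 [] then
        rows ++ [[("dataIndex", memberDataIndex), ("predictedLabel", clusterLabel), ("actualLabel", p.1)]]
      else rows) rowsWithLabels) []

-- ===== PORT B =====
-- Port of B: build the reverse multimap dataIndex -> labels once, then one lookup per member.
def GetActualLabels_alt (clusterDataIndices : List Int) (dataLabelDict : List (Int × List Int)) (clusterLabel : Int) : List (List (String × Int)) :=
  let labelsByIndex : PySem.Dict Int (List Int) :=
    dataLabelDict.foldl (fun d p =>
      (PySem.Set.ofList p.2).foldl (fun d idx => d.modify idx [] (· ++ [p.1])) d) PySem.Dict.empty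
  clusterDataIndices.flatMap (fun m =>
    (labelsByIndex.getD m []).map (fun label =>
      [("dataIndex", m), ("predictedLabel", clusterLabel), ("actualLabel", label)]))

-- ===== PRECONDITION & SPEC =====
-- Pre_ requires the association list's keys to be distinct: the Python argument is a dict,
-- whose keys are necessarily unique, so no Python input is excluded.
def Pre_GetActualLabels (clusterDataIndices : List Int) (dataLabelDict : List (Int × List Int)) (clusterLabel : Int) : Prop :=
  (dataLabelDict.map Prod.fst).Nodup
instance (clusterDataIndices : List Int) (dataLabelDict : List (Int × List Int)) (clusterLabel : Int) : Decidable (Pre_GetActualLabels clusterDataIndices dataLabelDict clusterLabel) := by unfold Pre_GetActualLabels; infer_instance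
def pvWitness_GetActualLabels : List Int × (List (Int × List Int)) × Int := ([0, 2], [(1, [0, 3]), (4, [2])], 7)

def Spec_GetActualLabels (clusterDataIndices : List Int) (dataLabelDict : List (Int × List Int)) (clusterLabel : Int) (out : List (List (String × Int))) : Prop := out = GetActualLabels_alt clusterDataIndices dataLabelDict clusterLabel
instance (clusterDataIndices : List Int) (dataLabelDict : List (Int × List Int)) (clusterLabel : Int) (out : List (List (String × Int))) : Decidable (Spec_GetActualLabels clusterDataIndices dataLabelDict clusterLabel out) := by unfold Spec_GetActualLabels; infer_instance

-- ===== CLAIM (what is proved, stated in full; the proofs are below) =====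
def Claim_equal_GetActualLabels : Prop := ∀ (clusterDataIndices : List Int) (dataLabelDict : List (Int × List Int)) (clusterLabel : Int), Dom_GetActualLabels clusterDataIndices dataLabelDict clusterLabel → Pre_GetActualLabels clusterDataIndices dataLabelDict clusterLabel → Spec_GetActualLabels clusterDataIndices dataLabelDict clusterLabel (GetActualLabels clusterDataIndices dataLabelDict clusterLabel)

-- ===== LEMMAS AND PROOFS =====

-- The inner loop of B's reverse-map construction, for one label k over a duplicate-free index list.
theorem getD_foldl_modify_append_label (s : List Int) (k : Int) (d : PySem.Dict Int (List Int)) (m : Int)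
    (hnd : s.Nodup) :
    ((s.foldl (fun d idx => d.modify idx [] (· ++ [k])) d).getD m []) =
      d.getD m [] ++ (if m ∈ s then [k] else []) := by
  induction s generalizing d with
  | nil => simp
  | cons a s ih =>
    rcases List.nodup_cons.mp hnd with ⟨ha, hs⟩
    simp only [List.foldl_cons, ih _ hs, PySem.Dict.getD_modify, List.mem_cons]
    by_cases hma : m = a
    · subst hma
      have : m ∉ s := ha
      simp [this]
    · simp [hma]

-- B's reverse map characterised: the labels stored at m are the keys of exactly those
-- entries whose index list contains m, in dictionary order.
theorem rev_getD (l : List (Int × List Int)) (d : PySem.Dict Int (List Int)) (m : Int) :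
    ((l.foldl (fun d p => (PySem.Set.ofList p.2).foldl (fun d idx => d.modify idx [] (· ++ [p.1])) d) d).getD m []) =
      d.getD m [] ++ ((l.filter (fun p => decide (m ∈ p.2))).map Prod.fst) := by
  induction l generalizing d with
  | nil => simp
  | cons p l ih =>
    simp only [List.foldl_cons, ih, List.filter_cons]
    rw [getD_foldl_modify_append_label _ _ _ _ (PySem.Set.nodup_ofList p.2)]
    by_cases hm : m ∈ p.2
    · simp [PySem.Set.mem_ofList, hm]
    · simp [PySem.Set.mem_ofList, hm]

-- ===== VERDICT (by name: the statement is the Claim_ definition above) =====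
-- B rewritten pointwise: one row per (member, matching entry), in A's order.
theorem alt_eq (ci : List Int) (dld : List (Int × List Int)) (cl : Int) :
    GetActualLabels_alt ci dld cl =
      ci.flatMap (fun m => (dld.filter (fun p => decide (m ∈ p.2))).map
        (fun p => [("dataIndex", m), ("predictedLabel", cl), ("actualLabel", p.1)])) := by
  unfold GetActualLabels_alt
  simp only [rev_getD, PySem.Dict.getD_empty, List.nil_append, List.map_map]
  rfl

theorem GetActualLabels_spec : Claim_equal_GetActualLabels := by
  intro ci dld cl _ hpre
  unfold Spec_GetActualLabels
  rw [alt_eq]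
  unfold GetActualLabels
  have hg : ∀ (rows : List (List (String × Int))) (m : Int),
      dld.foldl (fun rows p =>
        if m ∈ (PySem.Dict.mk dld).getD p.1 [] then
          rows ++ [[("dataIndex", m), ("predictedLabel", cl), ("actualLabel", p.1)]]
        else rows) rows =
      rows ++ (dld.filter (fun p => decide (m ∈ p.2))).map
        (fun p => [("dataIndex", m), ("predictedLabel", cl), ("actualLabel", p.1)]) := by
    intro rows m
    calc dld.foldl (fun rows p =>
            if m ∈ (PySem.Dict.mk dld).getD p.1 [] then
              rows ++ [[("dataIndex", m), ("predictedLabel", cl), ("actualLabel", p.1)]]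
            else rows) rows
        = dld.foldl (fun rows p =>
            if decide (m ∈ p.2) then
              rows ++ [[("dataIndex", m), ("predictedLabel", cl), ("actualLabel", p.1)]]
            else rows) rows := by
          apply PySem.List.foldl_congr_mem'
          intro p hp acc
          have hv : (PySem.Dict.mk dld).getD p.1 [] = p.2 :=
            PySem.Dict.getD_of_mem_items _ (by simpa using hp) (by simpa [PySem.Dict.keys] using hpre) []
          rw [hv]
          simp
      _ = rows ++ (dld.filter (fun p => decide (m ∈ p.2))).map
            (fun p => [("dataIndex", m), ("predictedLabel", cl), ("actualLabel", p.1)]) :=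
          PySem.List.foldl_append_if _ _ dld rows
  have hfun : (fun (rows : List (List (String × Int))) (m : Int) =>
      dld.foldl (fun rows p =>
        if m ∈ (PySem.Dict.mk dld).getD p.1 [] then
          rows ++ [[("dataIndex", m), ("predictedLabel", cl), ("actualLabel", p.1)]]
        else rows) rows) =
      fun rows m => rows ++ (dld.filter (fun p => decide (m ∈ p.2))).map
        (fun p => [("dataIndex", m), ("predictedLabel", cl), ("actualLabel", p.1)]) := by
    funext rows m; exact hg rows m
  rw [hfun, PySem.List.foldl_append_eq_flatMap, List.nil_append]
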